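-- pv_equiv track=rewrite | github.com/ochiai-PCKK/rainfall-data-workbench | src/uc_rainfall_zipflow/style_profile.py | _coerce_x_tick_hours_list
-- ===== SOURCE A (Python) =====
-- from typing import Any
--
-- def _coerce_x_tick_hours_list(value: Any) -> list[int]:
--     values: list[int] = []
--     if isinstance(value, (list, tuple)):
--         source = value
--     elif isinstance(value, str):
--         source = [part.strip() for part in value.split(",") if part.strip()]
--     else:
--         source = []
--     for item in source:
--         try:
--             hour = int(item)
--         except (TypeError, ValueError):
--             continue
--         if hour == 0:
--             # 旧設定（0時指定）を 24 時に読み替える。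
--             hour = 24
--         if 1 <= hour <= 24:
--             values.append(hour)
--     unique_sorted = sorted(set(values))
--     return unique_sorted if unique_sorted else [6, 12, 18]
-- ===== SOURCE B (Python) =====
-- def _as_hour(item):
--     try:
--         hour = int(item)
--     except (TypeError, ValueError):
--         return None
--     if hour == 0:
--         hour = 24
--     return hour if 1 <= hour <= 24 else None
--
--
-- def _coerce_x_tick_hours_list(value):
--     if isinstance(value, (list, tuple)):
--         source = value
--     elif isinstance(value, str):
--         source = [part.strip() for part in value.split(",") if part.strip()]
--     else:
--         source = []
--     hours = [_as_hour(item) for item in source]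
--     result = [h for h in range(1, 25) if h in hours]
--     return result if result else [6, 12, 18]
-- ===== Notes on version B (the rewrite author's own statement) =====
-- stated objective: alternative
-- what changed: B maps a factored-out hour validator over the parts and then emits the answer by scanning the bounded hour domain range(1,25) with a membership test, so A's append-accumulator loop and its sorted(set(...)) tail disappear.
import Mathlib
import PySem

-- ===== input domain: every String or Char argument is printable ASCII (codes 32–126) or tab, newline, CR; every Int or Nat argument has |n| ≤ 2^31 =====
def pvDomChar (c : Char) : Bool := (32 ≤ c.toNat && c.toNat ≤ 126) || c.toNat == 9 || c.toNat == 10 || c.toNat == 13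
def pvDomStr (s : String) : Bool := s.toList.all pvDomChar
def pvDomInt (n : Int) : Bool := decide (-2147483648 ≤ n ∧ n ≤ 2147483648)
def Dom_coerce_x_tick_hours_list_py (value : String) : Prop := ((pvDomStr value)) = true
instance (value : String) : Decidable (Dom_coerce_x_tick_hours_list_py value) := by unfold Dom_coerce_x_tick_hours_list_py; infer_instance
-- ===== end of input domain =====

-- B factors hour validation into a helper mapped over the parts and builds the result by a
-- bounded membership scan over range(1,25), replacing A's accumulator loop and sorted(set(...)).


-- ===== PORT A =====
-- value is a str here (signature String), so the isinstance dispatch lands in the str branch;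
-- int(item) on a str raises at most ValueError (= ofChars? none), matching the except clause.
def coerce_x_tick_hours_list_py (value : String) : List Int :=
  let source : List (List Char) :=
    ((PySem.Chars.splitOn value.toList [',']).map (fun part => PySem.Chars.strip part)).filter
      (fun part => part ≠ [])
  let values : List Int := source.foldl (fun acc item =>
      match PySem.Int.ofChars? item with
      | none => acc
      | some h =>
        let hour : Int := if h = 0 then 24 else h
        if 1 ≤ hour ∧ hour ≤ 24 then acc ++ [hour] else acc) []
  let unique_sorted := PySem.List.sorted (PySem.Set.ofList values) (fun x => x) false
  if unique_sorted ≠ [] then unique_sorted else [6, 12, 18]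

-- ===== PORT B =====
-- helper _as_hour of Source B: the validated hour of one part, none where int() raises or out of range
def pvAsHour (item : List Char) : Option Int :=
  match PySem.Int.ofChars? item with
  | none => none
  | some h =>
    let hour : Int := if h = 0 then 24 else h
    if 1 ≤ hour ∧ hour ≤ 24 then some hour else none

def coerce_x_tick_hours_list_py_alt (value : String) : List Int :=
  let source : List (List Char) :=
    ((PySem.Chars.splitOn value.toList [',']).map (fun part => PySem.Chars.strip part)).filter
      (fun part => part ≠ [])
  let hours : List (Option Int) := source.map pvAsHour
  let result := (PySem.List.pyRange 1 25 1).filter (fun h => decide (some h ∈ hours))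
  if result ≠ [] then result else [6, 12, 18]

-- ===== PRECONDITION & SPEC =====
def Spec_coerce_x_tick_hours_list_py (value : String) (out : List Int) : Prop := out = coerce_x_tick_hours_list_py_alt value
instance (value : String) (out : List Int) : Decidable (Spec_coerce_x_tick_hours_list_py value out) := by unfold Spec_coerce_x_tick_hours_list_py; infer_instance

-- ===== CLAIM (what is proved, stated in full; the proofs are below) =====
def Claim_equal_coerce_x_tick_hours_list_py : Prop := ∀ (value : String), Dom_coerce_x_tick_hours_list_py value → Spec_coerce_x_tick_hours_list_py value (coerce_x_tick_hours_list_py value)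

-- ===== LEMMAS AND PROOFS =====

lemma pvAsHour_bounds {item : List Char} {h : Int} (hh : pvAsHour item = some h) :
    1 ≤ h ∧ h ≤ 24 := by
  unfold pvAsHour at hh
  rcases hx : PySem.Int.ofChars? item with _ | v <;> rw [hx] at hh
  · exact absurd hh (by simp)
  · dsimp only at hh
    by_cases h0 : v = 0
    · subst h0
      simp at hh
      omega
    · simp only [if_neg h0] at hh
      split_ifs at hh with hb
      cases hh; exact hb

lemma stepA_eq : (fun (acc : List Int) (item : List Char) =>
      match PySem.Int.ofChars? item with
      | none => acc
      | some h =>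
        let hour : Int := if h = 0 then 24 else h
        if 1 ≤ hour ∧ hour ≤ 24 then acc ++ [hour] else acc)
    = fun acc item => match pvAsHour item with | none => acc | some hour => acc ++ [hour] := by
  funext acc item
  unfold pvAsHour
  rcases PySem.Int.ofChars? item with _ | v
  · rfl
  · dsimp only
    split_ifs <;> rfl

lemma foldA_eq (parts : List (List Char)) (acc : List Int) :
    parts.foldl (fun acc item => match pvAsHour item with | none => acc | some hour => acc ++ [hour]) acc
    = acc ++ parts.filterMap pvAsHour := by
  induction parts generalizing acc with
  | nil => simp
  | cons p ps ih =>
    rcases (pvAsHour p).eq_none_or_eq_some with ho | ⟨hour, ho⟩ <;>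
      simp only [List.foldl_cons, List.filterMap_cons, ho]
    · exact ih acc
    · simp [ih]

lemma filterMap_bounds (parts : List (List Char)) :
    ∀ x ∈ parts.filterMap pvAsHour, 1 ≤ x ∧ x ≤ 24 := by
  intro x hx
  rw [List.mem_filterMap] at hx
  obtain ⟨a, _, ha⟩ := hx
  exact pvAsHour_bounds ha

lemma sorted_set_eq_filter_range (H : List Int) (hb : ∀ x ∈ H, 1 ≤ x ∧ x ≤ 24) :
    PySem.List.sorted (PySem.Set.ofList H) (fun x => x) false
    = (PySem.List.pyRange 1 25 1).filter (fun h => decide (h ∈ H)) := by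
  apply PySem.List.sorted_eq_of_perm_of_pairwise_lt
  · rw [List.perm_ext_iff_of_nodup (List.Nodup.filter _ (by decide)) (PySem.Set.nodup_ofList H)]
    intro a
    simp only [List.mem_filter, PySem.Set.mem_ofList, decide_eq_true_eq]
    constructor
    · rintro ⟨_, h⟩; exact h
    · intro h
      refine ⟨PySem.List.mem_pyRange_one.mpr ?_, h⟩
      have := hb a h
      omega
  · exact List.Pairwise.filter _ (by decide)

lemma mem_map_iff_mem_filterMap (parts : List (List Char)) (h : Int) :
    (some h ∈ parts.map pvAsHour) ↔ h ∈ parts.filterMap pvAsHour := by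
  simp [List.mem_map, List.mem_filterMap]

-- ===== VERDICT (by name: the statement is the Claim_ definition above) =====
theorem coerce_x_tick_hours_list_py_spec : Claim_equal_coerce_x_tick_hours_list_py := by
  intro value _
  show coerce_x_tick_hours_list_py value = coerce_x_tick_hours_list_py_alt value
  unfold coerce_x_tick_hours_list_py coerce_x_tick_hours_list_py_alt
  rw [stepA_eq]
  dsimp only
  set parts : List (List Char) :=
    ((PySem.Chars.splitOn value.toList [',']).map (fun part => PySem.Chars.strip part)).filter
      (fun part => part ≠ []) with hparts
  have hmem : (fun h => decide (some h ∈ parts.map pvAsHour))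
      = fun h => decide (h ∈ parts.filterMap pvAsHour) := by
    funext h
    simp [mem_map_iff_mem_filterMap]
  rw [foldA_eq, List.nil_append,
      sorted_set_eq_filter_range _ (filterMap_bounds parts), hmem]
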